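-- pv_equiv track=rewrite | github.com/ChrisGVE/workspace-qdrant-mcp | src/python/common/utils/file_type_classifier.py | _get_compound_extension
-- ===== SOURCE A (Python) =====
-- def _get_compound_extension(filename: str) -> str:
--     """Extract compound extension from filename if present.
--
--     Handles multi-part extensions like .tar.gz, .tar.bz2, etc.
--
--     Args:
--         filename: Lowercase filename
--
--     Returns:
--         Compound extension if found, empty string otherwise
--
--     Examples:
--         >>> _get_compound_extension("package.tar.gz")
--         '.tar.gz'
--         >>> _get_compound_extension("archive.tgz")
--         '.tgz'
--         >>> _get_compound_extension("file.txt")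
--         ''
--     """
--     # Common compound extensions to check
--     compound_extensions = [
--         '.tar.gz', '.tar.bz2', '.tar.xz',
--         '.tgz', '.tbz2', '.txz',
--     ]
--
--     for ext in compound_extensions:
--         if filename.endswith(ext):
--             return ext
--
--     return ''
-- ===== SOURCE B (Python) =====
-- def _get_compound_extension(filename: str) -> str:
--     stem, sep, last = filename.rpartition('.')
--     if not sep:
--         return ''
--     if last in ('tgz', 'tbz2', 'txz'):
--         return '.' + last
--     if last in ('gz', 'bz2', 'xz') and stem.endswith('.tar'):
--         return '.tar.' + last
--     return ''
-- ===== Notes on version B (the rewrite author's own statement) =====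
-- stated objective: alternative
-- what changed: B splits the filename at its last dot with rpartition and classifies the resulting final segment (plus a tar-stem suffix check for the two-level forms), instead of testing the filename against each of six candidate suffixes in turn.
import Mathlib
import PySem

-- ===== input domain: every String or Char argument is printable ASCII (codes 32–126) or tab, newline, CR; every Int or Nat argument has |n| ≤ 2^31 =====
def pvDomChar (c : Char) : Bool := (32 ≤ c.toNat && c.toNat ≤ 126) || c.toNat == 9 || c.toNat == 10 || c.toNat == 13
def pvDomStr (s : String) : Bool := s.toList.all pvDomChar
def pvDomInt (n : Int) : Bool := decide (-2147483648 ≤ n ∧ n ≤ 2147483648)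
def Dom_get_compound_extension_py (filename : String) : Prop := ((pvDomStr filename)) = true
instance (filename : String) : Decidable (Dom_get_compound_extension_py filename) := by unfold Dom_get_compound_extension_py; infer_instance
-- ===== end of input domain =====

-- B splits the filename at its last dot (rpartition) and classifies that final segment,
-- instead of testing the filename against each of six candidate suffixes; objective: alternative.

-- ===== PORT A =====
-- the 'for ext in compound_extensions: if filename.endswith(ext): return ext' loop
def pvLoopA (filename : String) : List String → String
  | [] => ""
  | ext :: rest => if PySem.Str.endswith filename ext then ext else pvLoopA filename rest

def get_compound_extension_py (filename : String) : String :=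
  pvLoopA filename [".tar.gz", ".tar.bz2", ".tar.xz", ".tgz", ".tbz2", ".txz"]

-- ===== PORT B =====
-- hand port of Python str.rpartition('.') (PySem has no rpartition): scan the reversed
-- string for the separator; none = separator absent (Python's ('', '', s) case).
-- Exact for a single-character separator.
def pvRPartGo : List Char → List Char → Option (List Char × List Char)
  | [], _ => none
  | c :: rest, acc => if c = '.' then some (rest.reverse, acc) else pvRPartGo rest (c :: acc)

def pvRPartitionDot (s : List Char) : Option (List Char × List Char) :=
  pvRPartGo s.reverse []

def get_compound_extension_py_alt (filename : String) : String :=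
  match pvRPartitionDot filename.toList with
  | none => ""
  | some (stem, last) =>
    if last = "tgz".toList ∨ last = "tbz2".toList ∨ last = "txz".toList then
      String.ofList ('.' :: last)
    else if (last = "gz".toList ∨ last = "bz2".toList ∨ last = "xz".toList)
            ∧ PySem.Chars.endswith stem ".tar".toList = true then
      String.ofList (".tar.".toList ++ last)
    else ""

-- ===== PRECONDITION & SPEC =====
def Spec_get_compound_extension_py (filename : String) (out : String) : Prop := out = get_compound_extension_py_alt filename
instance (filename : String) (out : String) : Decidable (Spec_get_compound_extension_py filename out) := by unfold Spec_get_compound_extension_py; infer_instance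

-- ===== CLAIM (what is proved, stated in full; the proofs are below) =====
def Claim_equal_get_compound_extension_py : Prop := ∀ (filename : String), Dom_get_compound_extension_py filename → Spec_get_compound_extension_py filename (get_compound_extension_py filename)

-- ===== LEMMAS AND PROOFS =====

-- pvRPartGo returns none exactly when the scanned part has no dot
theorem pvRPartGo_none : ∀ (r acc : List Char), pvRPartGo r acc = none ↔ '.' ∉ r := by
  intro r
  induction r with
  | nil => intro acc; simp [pvRPartGo]
  | cons c rest ih =>
    intro acc
    by_cases hc : c = '.'
    · simp [pvRPartGo, hc]
    · simp [pvRPartGo, hc, ih, Ne.symm hc]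

-- pvRPartGo's success case: it has split off the dot-free tail after the last '.'
theorem pvRPartGo_some : ∀ (r acc stem last : List Char), '.' ∉ acc →
    pvRPartGo r acc = some (stem, last) →
    r.reverse ++ acc = stem ++ '.' :: last ∧ '.' ∉ last := by
  intro r
  induction r with
  | nil => intro acc stem last _ h; simp [pvRPartGo] at h
  | cons c rest ih =>
    intro acc stem last hacc h
    by_cases hc : c = '.'
    · subst hc
      simp [pvRPartGo] at h
      obtain ⟨h1, h2⟩ := h
      subst h1; subst h2
      constructor
      · simp
      · exact hacc
    · simp only [pvRPartGo, if_neg hc] at h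
      have := ih (c :: acc) stem last (by
        intro hm
        rcases List.mem_cons.mp hm with h' | h'
        · exact hc h'.symm
        · exact hacc h') h
      refine ⟨?_, this.2⟩
      have h1 := this.1
      simpa [List.append_assoc] using h1

-- a dot-free block before a '.' is uniquely determined (front version)
theorem dotfree_front : ∀ (a a' b b' : List Char), '.' ∉ a → '.' ∉ a' →
    a ++ '.' :: b = a' ++ '.' :: b' → a = a' ∧ b = b' := by
  intro a
  induction a with
  | nil =>
    intro a' b b' _ ha' h
    cases a' with
    | nil => simpa using h
    | cons c rest =>
      simp only [List.nil_append, List.cons_append, List.cons.injEq] at h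
      exact absurd (h.1 ▸ List.mem_cons_self) ha'
  | cons c rest ih =>
    intro a' b b' ha ha' h
    cases a' with
    | nil =>
      simp only [List.cons_append, List.nil_append, List.cons.injEq] at h
      exact absurd (h.1 ▸ List.mem_cons_self) ha
    | cons c' rest' =>
      simp only [List.cons_append, List.cons.injEq] at h
      obtain ⟨hcc, hrest⟩ := h
      have := ih rest' b b' (fun hm => ha (List.mem_cons_of_mem _ hm))
        (fun hm => ha' (List.mem_cons_of_mem _ hm)) hrest
      exact ⟨by rw [hcc, this.1], this.2⟩

-- the dot-free segment after the LAST '.' is uniquely determined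
theorem lastseg_unique (u v u' v' : List Char) (hv : '.' ∉ v) (hv' : '.' ∉ v')
    (h : u ++ '.' :: v = u' ++ '.' :: v') : v = v' ∧ u = u' := by
  have hr : v.reverse ++ '.' :: u.reverse = v'.reverse ++ '.' :: u'.reverse := by
    have := congrArg List.reverse h
    simpa [List.reverse_append] using this
  have := dotfree_front v.reverse v'.reverse u.reverse u'.reverse
    (by simpa using hv) (by simpa using hv') hr
  exact ⟨List.reverse_injective this.1, List.reverse_injective this.2⟩

-- endswith a single-level '.'-extension means equality with the last segment
theorem endswith_single (stem last e : List Char) (hdf : '.' ∉ last) (he : '.' ∉ e) :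
    PySem.Chars.endswith (stem ++ '.' :: last) ('.' :: e) = decide (last = e) := by
  by_cases hq : last = e
  · subst hq
    rw [decide_eq_true rfl]
    exact (PySem.Chars.endswith_iff _ _).mpr ⟨stem, rfl⟩
  · rw [decide_eq_false hq, Bool.eq_false_iff]
    intro hend
    obtain ⟨t, ht⟩ := (PySem.Chars.endswith_iff _ _).mp hend
    exact hq (lastseg_unique t e stem last he hdf ht).1.symm

-- endswith '.tar.<e>' means last segment is e and the stem ends with '.tar'
theorem endswith_tar (stem last e : List Char) (hdf : '.' ∉ last) (he : '.' ∉ e) :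
    PySem.Chars.endswith (stem ++ '.' :: last) ('.' :: 't' :: 'a' :: 'r' :: '.' :: e)
      = (decide (last = e) && PySem.Chars.endswith stem ['.', 't', 'a', 'r']) := by
  by_cases hq : last = e
  · subst hq
    rw [decide_eq_true rfl, Bool.true_and]
    cases hs : PySem.Chars.endswith stem ['.', 't', 'a', 'r'] with
    | true =>
      obtain ⟨w, hw⟩ := (PySem.Chars.endswith_iff _ _).mp hs
      apply (PySem.Chars.endswith_iff _ _).mpr
      exact ⟨w, by rw [← hw]; simp⟩
    | false =>
      rw [Bool.eq_false_iff]
      intro hend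
      obtain ⟨t, ht⟩ := (PySem.Chars.endswith_iff _ _).mp hend
      have ht' : (t ++ ['.', 't', 'a', 'r']) ++ '.' :: last = stem ++ '.' :: last := by
        rw [← ht]; simp
      have := lastseg_unique (t ++ ['.', 't', 'a', 'r']) last stem last hdf hdf ht'
      have htar : PySem.Chars.endswith stem ['.', 't', 'a', 'r'] = true :=
        (PySem.Chars.endswith_iff _ _).mpr ⟨t, this.2⟩
      rw [hs] at htar
      exact Bool.false_ne_true htar
  · rw [decide_eq_false hq, Bool.false_and, Bool.eq_false_iff]
    intro hend
    obtain ⟨t, ht⟩ := (PySem.Chars.endswith_iff _ _).mp hend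
    have ht' : (t ++ ['.', 't', 'a', 'r']) ++ '.' :: e = stem ++ '.' :: last := by
      rw [← ht]; simp
    exact hq (lastseg_unique (t ++ ['.', 't', 'a', 'r']) e stem last he hdf ht').1.symm

-- a dot-containing extension cannot end a dot-free string
theorem endswith_false_of_no_dot (l e : List Char) (he : '.' ∈ e) (hl : '.' ∉ l) :
    PySem.Chars.endswith l e = false := by
  rw [Bool.eq_false_iff]
  intro hend
  exact hl (((PySem.Chars.endswith_iff _ _).mp hend).subset he)

-- ===== VERDICT (by name: the statement is the Claim_ definition above) =====
theorem get_compound_extension_py_spec : Claim_equal_get_compound_extension_py := by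
  intro filename _
  unfold Spec_get_compound_extension_py
  unfold get_compound_extension_py get_compound_extension_py_alt pvRPartitionDot
  cases h : pvRPartGo filename.toList.reverse [] with
  | none =>
    have hnd : '.' ∉ filename.toList := by
      have := (pvRPartGo_none _ []).mp h
      simpa using this
    simp only [pvLoopA, PySem.Str.endswith_eq]
    rw [endswith_false_of_no_dot _ _ (by decide) hnd,
        endswith_false_of_no_dot _ _ (by decide) hnd,
        endswith_false_of_no_dot _ _ (by decide) hnd,
        endswith_false_of_no_dot _ _ (by decide) hnd,
        endswith_false_of_no_dot _ _ (by decide) hnd,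
        endswith_false_of_no_dot _ _ (by decide) hnd]
    simp
  | some p =>
    obtain ⟨stem, last⟩ := p
    obtain ⟨hl0, hdf⟩ := pvRPartGo_some _ [] stem last (by simp) h
    have hl : filename.toList = stem ++ '.' :: last := by simpa using hl0
    simp only [pvLoopA, PySem.Str.endswith_eq, hl]
    rw [show (".tar.gz" : String).toList = '.' :: 't' :: 'a' :: 'r' :: '.' :: ['g','z'] from rfl,
        show (".tar.bz2" : String).toList = '.' :: 't' :: 'a' :: 'r' :: '.' :: ['b','z','2'] from rfl,
        show (".tar.xz" : String).toList = '.' :: 't' :: 'a' :: 'r' :: '.' :: ['x','z'] from rfl,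
        show (".tgz" : String).toList = '.' :: ['t','g','z'] from rfl,
        show (".tbz2" : String).toList = '.' :: ['t','b','z','2'] from rfl,
        show (".txz" : String).toList = '.' :: ['t','x','z'] from rfl,
        endswith_tar stem last ['g','z'] hdf (by decide),
        endswith_tar stem last ['b','z','2'] hdf (by decide),
        endswith_tar stem last ['x','z'] hdf (by decide),
        endswith_single stem last ['t','g','z'] hdf (by decide),
        endswith_single stem last ['t','b','z','2'] hdf (by decide),
        endswith_single stem last ['t','x','z'] hdf (by decide)]
    cases hb : PySem.Chars.endswith stem ['.', 't', 'a', 'r'] <;>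
      · by_cases h1 : last = ['g','z'] <;> by_cases h2 : last = ['b','z','2'] <;>
        by_cases h3 : last = ['x','z'] <;> by_cases h4 : last = ['t','g','z'] <;>
        by_cases h5 : last = ['t','b','z','2'] <;> by_cases h6 : last = ['t','x','z'] <;>
        simp_all
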